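-- pv_equiv track=rewrite | github.com/SamuelCasellas/Sort-Algorithms | o_n_sort_nums.py | _iterate_data_dict
-- ===== SOURCE A (Python) =====
-- def _iterate_data_dict(data_dict: dict, min: int, max: int) -> list[int]:
--     list_to_return = []
--     # This is O(n) because it iterates through the entire range of numbers
--     for n in range(min, max + 1):
--         try:
--             # This is O(1) because it's a dictionary lookup
--             list_to_return.extend([n] * data_dict[n])
--         except KeyError:
--             pass
--     return list_to_return
-- ===== SOURCE B (Python) =====
-- def _iterate_data_dict(data_dict: dict, min: int, max: int) -> list[int]:
--     keys = sorted(k for k in data_dict if min <= k <= max)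
--     return [k for k in keys for _ in range(data_dict[k])]
-- ===== Notes on version B (the rewrite author's own statement) =====
-- stated objective: alternative
-- what changed: Instead of scanning every integer in [min, max] and probing the dict with try/except, B sorts only the keys present (restricted to the range) and expands each by its count; it trades the range scan for a sort of the present keys, which wins only when the keys are sparse in the range.
import Mathlib
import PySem

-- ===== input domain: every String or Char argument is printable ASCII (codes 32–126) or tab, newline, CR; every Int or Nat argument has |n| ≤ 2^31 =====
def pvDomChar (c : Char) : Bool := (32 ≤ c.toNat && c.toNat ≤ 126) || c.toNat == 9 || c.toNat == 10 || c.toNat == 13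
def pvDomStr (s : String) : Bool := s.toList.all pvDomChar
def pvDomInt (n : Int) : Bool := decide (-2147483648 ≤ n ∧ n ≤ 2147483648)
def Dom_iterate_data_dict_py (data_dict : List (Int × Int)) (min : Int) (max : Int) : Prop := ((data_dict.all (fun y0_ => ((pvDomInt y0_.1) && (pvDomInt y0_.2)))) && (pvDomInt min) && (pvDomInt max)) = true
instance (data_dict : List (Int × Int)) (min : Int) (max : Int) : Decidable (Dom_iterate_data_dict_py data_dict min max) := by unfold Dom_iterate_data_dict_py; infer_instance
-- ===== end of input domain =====

-- B replaces A's scan over every integer of [min, max] (with a try/except dict probe)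
-- by sorting the present keys restricted to the range and expanding each by its count.

-- ===== PORT A =====
-- '[n] * data_dict[n]' if n is a key, '[]' on KeyError (the except branch)
def pvTryExtend (d : PySem.Dict Int Int) (n : Int) : List Int :=
  match d.get? n with
  | some c => List.replicate c.toNat n
  | none => []

def iterate_data_dict_py (data_dict : List (Int × Int)) (min : Int) (max : Int) : List Int :=
  let d := PySem.Dict.ofList data_dict
  (PySem.List.pyRange min (max + 1) 1).foldl (fun acc n => acc ++ pvTryExtend d n) []

-- ===== PORT B =====
def iterate_data_dict_py_alt (data_dict : List (Int × Int)) (min : Int) (max : Int) : List Int :=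
  let d := PySem.Dict.ofList data_dict
  let keys := PySem.List.sorted (d.keys.filter (fun k => decide (min ≤ k) && decide (k ≤ max))) (fun x => x) false
  keys.flatMap (fun k => List.replicate (d.getD k 0).toNat k)

-- ===== PRECONDITION & SPEC =====
def Spec_iterate_data_dict_py (data_dict : List (Int × Int)) (min : Int) (max : Int) (out : List Int) : Prop := out = iterate_data_dict_py_alt data_dict min max
instance (data_dict : List (Int × Int)) (min : Int) (max : Int) (out : List Int) : Decidable (Spec_iterate_data_dict_py data_dict min max out) := by unfold Spec_iterate_data_dict_py; infer_instance

-- ===== CLAIM (what is proved, stated in full; the proofs are below) =====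
def Claim_equal_iterate_data_dict_py : Prop := ∀ (data_dict : List (Int × Int)) (min : Int) (max : Int), Dom_iterate_data_dict_py data_dict min max → Spec_iterate_data_dict_py data_dict min max (iterate_data_dict_py data_dict min max)

-- ===== LEMMAS AND PROOFS =====

-- flatMap ignores elements on which g is empty
theorem pv_flatMap_filter {α β : Type} (g : α → List β) (p : α → Bool)
    (l : List α) (h : ∀ x ∈ l, p x = false → g x = []) :
    l.flatMap g = (l.filter p).flatMap g := by
  induction l with
  | nil => rfl
  | cons a t ih =>
    simp only [List.flatMap_cons, List.filter_cons]
    rcases hp : p a with _ | _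
    · simp [h a (by simp) hp, ih (fun x hx => h x (by simp [hx]))]
    · simp [List.flatMap_cons, ih (fun x hx => h x (by simp [hx]))]

-- the sorted filtered key list IS the range filtered to present keys
theorem pv_keys_sorted (d : PySem.Dict Int Int) (hnd : d.keys.Nodup) (min max : Int) :
    PySem.List.sorted (d.keys.filter (fun k => decide (min ≤ k) && decide (k ≤ max))) (fun x => x) false
      = (PySem.List.pyRange min (max + 1) 1).filter (fun n => d.contains n) := by
  apply PySem.List.sorted_eq_of_perm_of_pairwise_lt
  · rw [List.perm_ext_iff_of_nodup (List.Nodup.filter _ (PySem.List.nodup_pyRange_one min (max + 1))) (List.Nodup.filter _ hnd)]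
    intro x
    simp only [List.mem_filter, PySem.List.mem_pyRange_one, PySem.Dict.contains_iff_mem_keys,
      Bool.and_eq_true, decide_eq_true_eq]
    constructor
    · rintro ⟨⟨h1, h2⟩, h3⟩; exact ⟨h3, h1, by omega⟩
    · rintro ⟨h3, h1, h2⟩; exact ⟨⟨h1, by omega⟩, h3⟩
  · exact List.Pairwise.filter _ (PySem.List.pairwise_lt_pyRange_one min (max + 1))

theorem iterate_spec_aux (data_dict : List (Int × Int)) (min max : Int) :
    iterate_data_dict_py data_dict min max = iterate_data_dict_py_alt data_dict min max := by
  have hnd : (PySem.Dict.ofList data_dict).keys.Nodup := PySem.Dict.nodup_keys_ofList data_dict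
  show (PySem.List.pyRange min (max + 1) 1).foldl
        (fun acc n => acc ++ pvTryExtend (PySem.Dict.ofList data_dict) n) []
      = (PySem.List.sorted ((PySem.Dict.ofList data_dict).keys.filter
            (fun k => decide (min ≤ k) && decide (k ≤ max))) (fun x => x) false).flatMap
          (fun k => List.replicate ((PySem.Dict.ofList data_dict).getD k 0).toNat k)
  rw [PySem.List.foldl_append_eq_flatMap, List.nil_append,
    pv_flatMap_filter (pvTryExtend (PySem.Dict.ofList data_dict))
      (fun n => (PySem.Dict.ofList data_dict).contains n) _
      (by
        intro x _ hx
        unfold pvTryExtend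
        rw [(PySem.Dict.get?_eq_none_iff_contains _ _).mpr hx]),
    pv_keys_sorted (PySem.Dict.ofList data_dict) hnd min max]
  refine List.flatMap_congr ?_
  intro k hk
  rcases List.mem_filter.mp hk with ⟨-, hc⟩
  unfold pvTryExtend
  rcases hg : (PySem.Dict.ofList data_dict).get? k with _ | c
  · rw [(PySem.Dict.get?_eq_none_iff_contains _ _).mp hg] at hc; simp at hc
  · rw [PySem.Dict.getD_of_get?_eq_some _ _ hg]

-- ===== VERDICT (by name: the statement is the Claim_ definition above) =====
theorem iterate_data_dict_py_spec : Claim_equal_iterate_data_dict_py := by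
  intro data_dict min max _
  unfold Spec_iterate_data_dict_py
  exact iterate_spec_aux data_dict min max
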